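-- pv_equiv track=rewrite | github.com/mlflautt/AlchemicalLab | GraphEngine/modules/narrative_generation.py | _should_faction_conflict
-- ===== SOURCE A (Python) =====
-- from typing import Dict, Any, List, Optional
--
-- def _should_faction_conflict(fac1: Dict, fac2: Dict) -> bool:
--     """Determine if two factions should be in conflict."""
--     ideologies = [fac1.get('ideology'), fac2.get('ideology')]
--
--     opposing_pairs = [
--         ('order', 'chaos'),
--         ('good', 'evil'),
--         ('conservative', 'progressive'),
--         ('expansionist', 'isolationist')
--     ]
--
--     for opp1, opp2 in opposing_pairs:
--         if opp1 in ideologies and opp2 in ideologies: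
--             return True
--
--     return False
-- ===== SOURCE B (Python) =====
-- _IDEOLOGY_AXIS = ('order', 'chaos', 'good', 'evil',
--                   'conservative', 'progressive', 'expansionist', 'isolationist')
--
-- def _should_faction_conflict(fac1, fac2):
--     """Determine if two factions should be in conflict."""
--     try:
--         i = _IDEOLOGY_AXIS.index(fac1.get('ideology'))
--         j = _IDEOLOGY_AXIS.index(fac2.get('ideology'))
--     except ValueError:
--         return False
--     return i // 2 == j // 2 and i != j
-- ===== Notes on version B (the rewrite author's own statement) =====
-- stated objective: alternative
-- what changed: Replaces the scan over opposing pairs with membership tests by positional arithmetic: each ideology's index in one flat tuple is looked up, and the factions conflict iff the indices fall in the same consecutive pair (equal quotient by 2) but differ.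
import Mathlib
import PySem

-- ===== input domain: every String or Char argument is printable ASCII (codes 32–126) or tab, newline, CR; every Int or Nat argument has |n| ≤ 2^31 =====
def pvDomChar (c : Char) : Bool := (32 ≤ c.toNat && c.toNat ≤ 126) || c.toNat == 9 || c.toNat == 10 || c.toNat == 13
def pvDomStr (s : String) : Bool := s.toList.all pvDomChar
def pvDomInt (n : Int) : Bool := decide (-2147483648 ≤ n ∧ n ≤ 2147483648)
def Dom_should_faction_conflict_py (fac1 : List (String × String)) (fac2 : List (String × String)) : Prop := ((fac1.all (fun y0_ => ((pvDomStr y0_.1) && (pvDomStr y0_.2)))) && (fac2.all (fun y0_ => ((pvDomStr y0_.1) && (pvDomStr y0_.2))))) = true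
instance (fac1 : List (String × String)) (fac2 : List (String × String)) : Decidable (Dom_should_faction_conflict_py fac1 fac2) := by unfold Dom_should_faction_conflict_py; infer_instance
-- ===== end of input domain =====

-- B decides conflict by index arithmetic on one flat ideology tuple (same pair = same quotient by 2, different index) instead of A's scan over opposing pairs (objective: alternative).


-- ===== PORT A =====
-- the for-loop with early return over opposing_pairs
def conflictLoop : List (String × String) → List (Option String) → Bool
  | [], _ => false
  | (opp1, opp2) :: rest, ideologies =>
    if ideologies.contains (some opp1) && ideologies.contains (some opp2) then true
    else conflictLoop rest ideologies

def should_faction_conflict_py (fac1 : List (String × String)) (fac2 : List (String × String)) : Bool :=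
  let ideologies : List (Option String) :=
    [(PySem.Dict.mk fac1).get? "ideology", (PySem.Dict.mk fac2).get? "ideology"]
  let opposing_pairs : List (String × String) :=
    [("order", "chaos"), ("good", "evil"),
     ("conservative", "progressive"), ("expansionist", "isolationist")]
  conflictLoop opposing_pairs ideologies

-- ===== PORT B =====
-- the flat tuple _IDEOLOGY_AXIS; elements as Option String since .index is applied to fac.get('ideology')
def ideologyAxis : List (Option String) :=
  [some "order", some "chaos", some "good", some "evil",
   some "conservative", some "progressive", some "expansionist", some "isolationist"]

def should_faction_conflict_py_alt (fac1 : List (String × String)) (fac2 : List (String × String)) : Bool :=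
  -- try: i = _IDEOLOGY_AXIS.index(...); j = _IDEOLOGY_AXIS.index(...) except ValueError: return False
  match PySem.List.index? ideologyAxis ((PySem.Dict.mk fac1).get? "ideology"),
        PySem.List.index? ideologyAxis ((PySem.Dict.mk fac2).get? "ideology") with
  | some i, some j => i / 2 == j / 2 && i != j   -- i // 2 == j // 2 and i != j (Nat, nonneg: exact)
  | _, _ => false

-- ===== PRECONDITION & SPEC =====
def Spec_should_faction_conflict_py (fac1 : List (String × String)) (fac2 : List (String × String)) (out : Bool) : Prop := out = should_faction_conflict_py_alt fac1 fac2
instance (fac1 : List (String × String)) (fac2 : List (String × String)) (out : Bool) : Decidable (Spec_should_faction_conflict_py fac1 fac2 out) := by unfold Spec_should_faction_conflict_py; infer_instance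

-- ===== CLAIM (what is proved, stated in full; the proofs are below) =====
def Claim_equal_should_faction_conflict_py : Prop := ∀ (fac1 : List (String × String)) (fac2 : List (String × String)), Dom_should_faction_conflict_py fac1 fac2 → Spec_should_faction_conflict_py fac1 fac2 (should_faction_conflict_py fac1 fac2)

-- ===== LEMMAS AND PROOFS =====

-- every Option String is either one of the eight axis members or outside the axis
theorem classify (o : Option String) :
    (o = some "order" ∨ o = some "chaos" ∨ o = some "good" ∨ o = some "evil" ∨
     o = some "conservative" ∨ o = some "progressive" ∨ o = some "expansionist" ∨
     o = some "isolationist") ∨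
    (PySem.List.index? ideologyAxis o = none ∧
     o ≠ some "order" ∧ o ≠ some "chaos" ∧ o ≠ some "good" ∧ o ≠ some "evil" ∧
     o ≠ some "conservative" ∧ o ≠ some "progressive" ∧ o ≠ some "expansionist" ∧
     o ≠ some "isolationist") := by
  by_cases h : o ∈ ideologyAxis
  · left; simpa [ideologyAxis] using h
  · right
    refine ⟨(PySem.List.index?_eq_none_iff _ _).mpr h, ?_⟩
    simp only [ideologyAxis, List.mem_cons, List.not_mem_nil, or_false] at h
    push Not at h
    exact h

-- the core computation depends only on the two looked-up ideology values
theorem core_eq (i1 i2 : Option String) :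
    conflictLoop [("order", "chaos"), ("good", "evil"),
      ("conservative", "progressive"), ("expansionist", "isolationist")] [i1, i2] =
    (match PySem.List.index? ideologyAxis i1, PySem.List.index? ideologyAxis i2 with
     | some i, some j => i / 2 == j / 2 && i != j
     | _, _ => false) := by
  rcases classify i1 with h1 | ⟨hn1, e1, e2, e3, e4, e5, e6, e7, e8⟩
  · rcases classify i2 with h2 | ⟨hn2, f1, f2, f3, f4, f5, f6, f7, f8⟩
    · -- both concrete: 64 closed cases
      rcases h1 with h|h|h|h|h|h|h|h <;> rcases h2 with g|g|g|g|g|g|g|g <;>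
        subst h <;> subst g <;> decide
    · -- i2 outside the axis: both sides false
      rw [PySem.List.index?_eq_idxOf?] at hn2
      rcases h1 with h|h|h|h|h|h|h|h <;> subst h <;>
        simp [conflictLoop, hn2, Ne.symm f1, Ne.symm f2, Ne.symm f3, Ne.symm f4,
          Ne.symm f5, Ne.symm f6, Ne.symm f7, Ne.symm f8]
  · -- i1 outside the axis: both sides false
    rw [PySem.List.index?_eq_idxOf?] at hn1
    simp [conflictLoop, hn1, Ne.symm e1, Ne.symm e2, Ne.symm e3, Ne.symm e4,
      Ne.symm e5, Ne.symm e6, Ne.symm e7, Ne.symm e8]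
    refine ⟨?_, ?_, ?_, ?_⟩ <;> (rintro rfl; simp)

-- ===== VERDICT (by name: the statement is the Claim_ definition above) =====
theorem should_faction_conflict_py_spec : Claim_equal_should_faction_conflict_py := by
  intro fac1 fac2 _
  unfold Spec_should_faction_conflict_py should_faction_conflict_py should_faction_conflict_py_alt
  exact core_eq _ _
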